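-- pv_equiv track=rewrite | github.com/ashrust/NewTab | pull_images.py | trimTitle
-- ===== SOURCE A (Python) =====
-- brackets_list = ['[',']','{','}','(',')']
--
-- def trimTitle(title):
--   #split title by spaces
--   words = title.split(" ")
--   #clean string
--   rebuilt = []
--   for w in words:
--     if any(b in w for b in brackets_list):
--       #stop when we find a bracket, if we have a title
--       if len(rebuilt) > 0:
--         break
--     else:
--       rebuilt.append(w)
--     #print (rebuilt)
--   #join the string again
--   new_title = " ".join(rebuilt)
--   return new_title
-- ===== SOURCE B (Python) =====
-- brackets_list = ['[',']','{','}','(',')']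
--
-- def trimTitle(title):
--   # Two phase-distinct passes instead of one flag-driven loop:
--   # phase 1 drops the leading bracketed words, phase 2 collects words
--   # up to (excluding) the next bracketed word.
--   def has_bracket(w):
--     return any(b in w for b in brackets_list)
--   rest = title.split(" ")
--   while rest and has_bracket(rest[0]):
--     rest = rest[1:]
--   kept = []
--   while rest and not has_bracket(rest[0]):
--     kept.append(rest[0])
--     rest = rest[1:]
--   return " ".join(kept)
-- ===== Notes on version B (the rewrite author's own statement) =====
-- stated objective: simpler
-- what changed: Replaces the single flag-driven loop (skip-while-empty / break-once-nonempty) by two phase-distinct scans: drop leading bracketed words, then take words until the next bracketed word.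
import Mathlib
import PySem

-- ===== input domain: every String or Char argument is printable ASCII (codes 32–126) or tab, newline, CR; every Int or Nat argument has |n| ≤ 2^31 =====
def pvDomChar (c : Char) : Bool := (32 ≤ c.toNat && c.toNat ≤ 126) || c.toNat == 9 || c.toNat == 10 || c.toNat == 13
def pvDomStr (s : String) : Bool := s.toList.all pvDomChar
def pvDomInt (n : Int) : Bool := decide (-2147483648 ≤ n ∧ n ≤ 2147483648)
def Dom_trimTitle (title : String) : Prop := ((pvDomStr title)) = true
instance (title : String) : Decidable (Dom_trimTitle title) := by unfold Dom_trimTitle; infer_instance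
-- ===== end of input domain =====

-- B changes the decomposition only: one flag-driven loop with break becomes two
-- phase-distinct scans (drop leading bracketed words, take until the next one).

-- shared helper: 'any(b in w for b in brackets_list)' (identical in both sources)
def bracketsList : List String := ["[", "]", "{", "}", "(", ")"]

def hasBracket (w : String) : Bool := bracketsList.any (fun b => PySem.Str.isIn b w)

-- ===== PORT A =====
-- the for-loop over words with state 'rebuilt' and the early break
def trimLoopA : List String → List String → List String
  | [], rebuilt => rebuilt
  | w :: ws, rebuilt =>
    if hasBracket w then
      (if rebuilt.length > 0 then rebuilt else trimLoopA ws rebuilt)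
    else
      trimLoopA ws (rebuilt ++ [w])

def trimTitle (title : String) : String :=
  PySem.Str.join " " (trimLoopA (((PySem.Str.split? title " ").getD [])) [])

-- ===== PORT B =====
-- phase 1: 'while rest and has_bracket(rest[0]): rest = rest[1:]'
def dropPhase : List String → List String
  | [] => []
  | w :: ws => if hasBracket w then dropPhase ws else w :: ws

-- phase 2: 'while rest and not has_bracket(rest[0]): kept.append(rest[0]); rest = rest[1:]'
def takePhase : List String → List String
  | [] => []
  | w :: ws => if hasBracket w then [] else w :: takePhase ws

def trimTitle_alt (title : String) : String :=
  PySem.Str.join " " (takePhase (dropPhase (((PySem.Str.split? title " ").getD []))))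

-- ===== PRECONDITION & SPEC =====
def Spec_trimTitle (title : String) (out : String) : Prop := out = trimTitle_alt title
instance (title : String) (out : String) : Decidable (Spec_trimTitle title out) := by unfold Spec_trimTitle; infer_instance

-- ===== CLAIM (what is proved, stated in full; the proofs are below) =====
def Claim_equal_trimTitle : Prop := ∀ (title : String), Dom_trimTitle title → Spec_trimTitle title (trimTitle title)

-- ===== LEMMAS AND PROOFS =====
-- once 'rebuilt' is nonempty, A's loop only ever appends the takePhase of the rest
theorem trimLoopA_nonempty (ws : List String) :
    ∀ acc : List String, acc ≠ [] → trimLoopA ws acc = acc ++ takePhase ws := by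
  induction ws with
  | nil => intro acc _; simp [trimLoopA, takePhase]
  | cons w ws ih =>
    intro acc hacc
    by_cases hb : hasBracket w
    · have : acc.length > 0 := List.length_pos_iff.mpr hacc
      simp [trimLoopA, takePhase, hb, this]
    · simp [trimLoopA, takePhase, hb, ih (acc ++ [w]) (by simp)]

theorem trimLoopA_nil (ws : List String) :
    trimLoopA ws [] = takePhase (dropPhase ws) := by
  induction ws with
  | nil => simp [trimLoopA, dropPhase, takePhase]
  | cons w ws ih =>
    by_cases hb : hasBracket w
    · simp [trimLoopA, dropPhase, hb, ih]
    · simp [trimLoopA, dropPhase, takePhase, hb,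
        trimLoopA_nonempty ws [w] (by simp)]

-- ===== VERDICT (by name: the statement is the Claim_ definition above) =====
theorem trimTitle_spec : Claim_equal_trimTitle := by
  intro title _
  unfold Spec_trimTitle trimTitle trimTitle_alt
  rw [trimLoopA_nil]
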